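-- pv_equiv track=rewrite | github.com/watf-dev/MeshGeneration | IGA/src/gen_square.py | toIEN
-- ===== SOURCE A (Python) =====
-- def toIEN(point_position, total):
--   s = 0
--   point_position_ = point_position[::-1]
--   t_ = total[::-1]
--   for point_position,t in zip(point_position_,t_):
--     s *= t
--     s += point_position
--   return s
-- ===== SOURCE B (Python) =====
-- def _combine(pairs):
--     # returns (value, product-of-radices) of the segment; front = least significant
--     n = len(pairs)
--     if n == 0:
--         return 0, 1
--     if n == 1:
--         return pairs[0]
--     mid = n // 2
--     vL, pL = _combine(pairs[:mid])
--     vR, pR = _combine(pairs[mid:])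
--     return vL + pL * vR, pL * pR
--
-- def toIEN(point_position, total):
--     k = min(len(point_position), len(total))
--     pairs = list(zip(point_position[len(point_position)-k:], total[len(total)-k:]))
--     return _combine(pairs)[0]
-- ===== Notes on version B (the rewrite author's own statement) =====
-- stated objective: alternative
-- what changed: B replaces A's reverse-both-lists-then-Horner multiply-accumulate loop with divide and conquer on the end-aligned (position, radix) pairs, combining (value, radix-product) of the two halves; intended as faster on big integers (balanced products), measured 9.46x at n=65536 on the one input both finished, but not confirmed by the timing rule.
import Mathlib
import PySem

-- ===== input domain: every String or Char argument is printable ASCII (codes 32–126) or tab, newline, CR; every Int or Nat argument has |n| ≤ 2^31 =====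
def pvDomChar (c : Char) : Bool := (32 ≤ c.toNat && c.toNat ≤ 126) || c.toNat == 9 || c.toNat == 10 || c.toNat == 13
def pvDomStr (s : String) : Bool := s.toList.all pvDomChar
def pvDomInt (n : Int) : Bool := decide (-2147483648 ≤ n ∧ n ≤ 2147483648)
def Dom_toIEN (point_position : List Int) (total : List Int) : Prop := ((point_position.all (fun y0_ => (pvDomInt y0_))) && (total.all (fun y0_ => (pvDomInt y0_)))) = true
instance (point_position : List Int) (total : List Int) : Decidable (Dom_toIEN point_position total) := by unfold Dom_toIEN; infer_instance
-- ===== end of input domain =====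

-- B replaces A's reverse-both-lists-then-Horner loop by divide and conquer on the
-- end-aligned suffix pairs, combining (value, radix-product) of halves (intended as faster
-- on big integers; a timing run measured 9.46x at n=65536 but did not confirm the label).

-- ===== PORT A =====
def toIEN (point_position : List Int) (total : List Int) : Int :=
  let s : Int := 0
  let point_position_ := (PySem.List.slice? point_position none none (-1)).getD []
  let t_ := (PySem.List.slice? total none none (-1)).getD []
  (point_position_.zip t_).foldl (fun s pt => s * pt.2 + pt.1) s

-- ===== PORT B =====
-- (value, product of radices) of a segment of (position, radix) pairs, least significant first
def pvCombine (pairs : List (Int × Int)) : Int × Int :=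
  match h : pairs with
  | [] => (0, 1)
  | [pt] => (pt.1, pt.2)
  | _ :: _ :: _ =>
    let mid := pairs.length / 2
    let L := pvCombine (pairs.take mid)
    let R := pvCombine (pairs.drop mid)
    (L.1 + L.2 * R.1, L.2 * R.2)
termination_by pairs.length
decreasing_by all_goals subst h; simp_all [List.length_take, List.length_drop]; omega

def toIEN_alt (point_position : List Int) (total : List Int) : Int :=
  let k := min point_position.length total.length
  let pairs := (point_position.drop (point_position.length - k)).zip
                 (total.drop (total.length - k))
  (pvCombine pairs).1

-- ===== PRECONDITION & SPEC =====
def Spec_toIEN (point_position : List Int) (total : List Int) (out : Int) : Prop := out = toIEN_alt point_position total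
instance (point_position : List Int) (total : List Int) (out : Int) : Decidable (Spec_toIEN point_position total out) := by unfold Spec_toIEN; infer_instance

-- ===== CLAIM (what is proved, stated in full; the proofs are below) =====
def Claim_equal_toIEN : Prop := ∀ (point_position : List Int) (total : List Int), Dom_toIEN point_position total → Spec_toIEN point_position total (toIEN point_position total)

-- ===== LEMMAS AND PROOFS =====

-- zip of reverses of equal-length lists is the reverse of the zip
theorem zip_reverse_eq {α β : Type} (l₁ : List α) (l₂ : List β) (h : l₁.length = l₂.length) :
    l₁.reverse.zip l₂.reverse = (l₁.zip l₂).reverse := by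
  induction l₁ generalizing l₂ with
  | nil => cases l₂ <;> simp_all
  | cons a l₁ ih =>
    cases l₂ with
    | nil => simp_all
    | cons b l₂ =>
      simp only [List.length_cons, Nat.succ.injEq] at h
      rw [List.reverse_cons, List.reverse_cons, List.zip_append (by simpa using h), ih l₂ h]
      simp

-- the (value, product) semantics of a segment, as foldr's over the pairs
theorem foldr_val_prod (l : List (Int × Int)) (v : Int) :
    l.foldr (fun pt r => r * pt.2 + pt.1) v
      = l.foldr (fun pt r => r * pt.2 + pt.1) 0
        + v * l.foldr (fun pt r => r * pt.2) 1 := by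
  induction l with
  | nil => simp
  | cons pt l ih => simp only [List.foldr_cons, ih]; ring

theorem foldr_prod_mul (l : List (Int × Int)) (p : Int) :
    l.foldr (fun pt r => r * pt.2) p = p * l.foldr (fun pt r => r * pt.2) 1 := by
  induction l with
  | nil => simp
  | cons pt l ih => simp only [List.foldr_cons, ih]; ring

theorem combine_eq (l : List (Int × Int)) :
    pvCombine l = (l.foldr (fun pt r => r * pt.2 + pt.1) 0,
                   l.foldr (fun pt r => r * pt.2) 1) := by
  induction hn : l.length using Nat.strong_induction_on generalizing l with
  | _ n ih =>
    match l with
    | [] => simp [pvCombine]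
    | [pt] => simp [pvCombine]
    | a :: b :: rest =>
      rw [pvCombine]
      have h1 : ((a :: b :: rest).take ((a :: b :: rest).length / 2)).length < n := by
        simp only [List.length_take, List.length_cons] at *; omega
      have h2 : ((a :: b :: rest).drop ((a :: b :: rest).length / 2)).length < n := by
        simp only [List.length_drop, List.length_cons] at *; omega
      rw [ih _ h1 _ rfl, ih _ h2 _ rfl]
      conv_rhs => rw [← List.take_append_drop ((a :: b :: rest).length / 2) (a :: b :: rest),
                      List.foldr_append, List.foldr_append, foldr_prod_mul, foldr_val_prod]
      simp only [Prod.mk.injEq]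
      constructor <;> ring

-- the zipped reversed lists are the reverse of the zip of the end-aligned suffixes
theorem zip_of_reversed (pp tt : List Int) :
    pp.reverse.zip tt.reverse
      = ((pp.drop (pp.length - min pp.length tt.length)).zip
          (tt.drop (tt.length - min pp.length tt.length))).reverse := by
  set k := min pp.length tt.length with hk
  have hpp : pp.reverse = (pp.drop (pp.length - k)).reverse ++ (pp.take (pp.length - k)).reverse := by
    rw [← List.reverse_append, List.take_append_drop]
  have htt : tt.reverse = (tt.drop (tt.length - k)).reverse ++ (tt.take (tt.length - k)).reverse := by
    rw [← List.reverse_append, List.take_append_drop]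
  have hlen : (pp.drop (pp.length - k)).length = (tt.drop (tt.length - k)).length := by
    simp [List.length_drop]; omega
  have htail : ((pp.take (pp.length - k)).reverse).zip ((tt.take (tt.length - k)).reverse) = [] := by
    rcases le_total pp.length tt.length with h1 | h1
    · have : pp.length - k = 0 := by omega
      simp [this]
    · have : tt.length - k = 0 := by omega
      simp [this]
  rw [hpp, htt, List.zip_append (by simpa using hlen), htail,
      zip_reverse_eq _ _ hlen, List.append_nil]

-- Horner over the reversed zip equals the first component of the divide-and-conquer pair:
theorem horner_eq_combine (Z : List (Int × Int)) :
    Z.reverse.foldl (fun s pt => s * pt.2 + pt.1) 0 = (pvCombine Z).1 := by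
  rw [List.foldl_reverse, combine_eq]

-- ===== VERDICT (by name: the statement is the Claim_ definition above) =====
theorem toIEN_spec : Claim_equal_toIEN := by
  intro pp tt _
  show toIEN pp tt = toIEN_alt pp tt
  unfold toIEN toIEN_alt
  simp only [PySem.List.slice?_none_none_neg_one, Option.getD_some]
  rw [zip_of_reversed, horner_eq_combine]
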